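-- pv_equiv track=rewrite | github.com/ToniCaimari/Codewars | Python/kyu6/missing_letter.py | find_missing_letter
-- ===== SOURCE A (Python) =====
-- import string
--
-- def find_missing_letter(chars):
--     check = [i.lower() for i in chars]
--     abc = string.ascii_lowercase
--
--     start = abc[abc.index(check[0]):abc.index(check[0])+len(chars)+1]
--
--     for i in start:
--         if i in check:
--             continue
--         else:
--             if chars[0].isupper() == True:
--                 return i.upper()
--             else:
--                 return i
-- ===== SOURCE B (Python) =====
-- import string
--
-- def find_missing_letter(chars):
--     abc = string.ascii_lowercase
--     lowered = [s.lower() for s in chars]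
--     i0 = abc.index(lowered[0])
--     present = {ord(s) - 97 for s in lowered if len(s) == 1 and 'a' <= s <= 'z'}
--     missing = set(range(i0, min(i0 + len(chars) + 1, 26))) - present
--     letter = chr(min(missing) + 97)
--     return letter.upper() if chars[0].isupper() else letter
-- ===== Notes on version B (the rewrite author's own statement) =====
-- stated objective: alternative
-- what changed: A slices the lowercase alphabet and scans it with an O(n) list-membership test per window letter; B builds a set of letter codes once and returns the minimum of the set difference window-minus-present, recased from the first element.
-- outside the precondition, e.g. on find_missing_letter(['y', 'z']): A returns None, B raises ValueError
import Mathlib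
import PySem

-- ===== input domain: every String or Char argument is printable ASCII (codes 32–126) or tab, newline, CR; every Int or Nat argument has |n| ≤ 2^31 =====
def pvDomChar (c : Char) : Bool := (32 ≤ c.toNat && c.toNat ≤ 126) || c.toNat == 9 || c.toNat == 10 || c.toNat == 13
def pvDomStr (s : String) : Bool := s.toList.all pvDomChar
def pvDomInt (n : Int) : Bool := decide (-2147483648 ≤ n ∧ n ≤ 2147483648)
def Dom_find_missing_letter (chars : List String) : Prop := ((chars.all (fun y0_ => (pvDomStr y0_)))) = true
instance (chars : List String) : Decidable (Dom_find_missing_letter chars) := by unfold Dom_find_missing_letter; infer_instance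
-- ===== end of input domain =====

-- B replaces A's scan of an alphabet slice (list membership inside the loop) by a set-difference-and-minimum
-- computation over letter codes (objective: alternative; same behaviour wherever A returns a string).


-- ===== PORT A =====
-- str.isupper(), ported by hand (exact on the ASCII domain, where the cased characters are exactly A–Z/a–z):
-- at least one cased character and no lowercase one.
def pyStrIsupper (s : String) : Bool :=
  s.toList.any (fun c => PySem.Chars.isalpha c) && s.toList.all (fun c => !PySem.Chars.islower c)

-- A's for-loop over the slice: first letter not in check, recased; falling off the loop is Python's
-- implicit 'return None' (not a String; excluded by Pre_), rendered as "".
def findA_loop (check : List String) (up : Bool) : List Char → String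
  | [] => ""
  | i :: rest =>
    if check.contains (String.ofList [i]) then findA_loop check up rest
    else if up then PySem.Str.upper (String.ofList [i]) else String.ofList [i]

def find_missing_letter (chars : List String) : String :=
  let check := chars.map PySem.Str.lower
  let abc := "abcdefghijklmnopqrstuvwxyz"
  match chars with
  | [] => ""        -- check[0] raises IndexError (excluded by Pre_)
  | s0 :: _ =>
    let idx := PySem.Str.find abc (PySem.Str.lower s0)    -- abc.index(check[0])
    if idx = -1 then ""                                   -- .index raises ValueError (excluded by Pre_)
    else
      let start := PySem.Str.slice abc (some idx) (some (idx + (chars.length : Int) + 1))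
      findA_loop check (pyStrIsupper s0) start.toList

-- ===== PORT B =====
-- ord(s) of a single-character string
def pyOrd1 (s : String) : Int := ((s.toList.headD 'a').toNat : Int)

-- len(s) == 1 and 'a' <= s <= 'z'  (on a one-character string the lexicographic string order is the character order)
def isLowerLetter1 (s : String) : Bool :=
  match s.toList with
  | [c] => decide ('a' ≤ c ∧ c ≤ 'z')
  | _ => false

def find_missing_letter_alt (chars : List String) : String :=
  match chars with
  | [] => ""        -- lowered[0] raises IndexError (excluded by Pre_)
  | s0 :: _ =>
    let abc := "abcdefghijklmnopqrstuvwxyz"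
    let lowered := chars.map PySem.Str.lower
    let i0 := PySem.Str.find abc (PySem.Str.lower s0)     -- abc.index(lowered[0])
    if i0 = -1 then ""                                    -- .index raises ValueError (excluded by Pre_)
    else
      let present : PySem.Set Int :=
        PySem.Set.ofList ((lowered.filter isLowerLetter1).map (fun s => pyOrd1 s - 97))
      let window : PySem.Set Int :=
        PySem.Set.ofList (PySem.List.pyRange i0 (min (i0 + (chars.length : Int) + 1) 26) 1)
      let missing := PySem.Set.diff window present
      match PySem.List.min? missing (fun x => x) with
      | none => ""                                        -- min() of an empty set: ValueError (excluded by Pre_)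
      | some m =>
        let letter := String.ofList [Char.ofNat (m + 97).toNat]
        if pyStrIsupper s0 then PySem.Str.upper letter else letter

-- ===== PRECONDITION & SPEC =====
-- Pre_ excludes exactly the inputs where Python's A does not return a string: the empty list (IndexError),
-- a first element whose lowercase form is not a substring of the alphabet (abc.index raises ValueError),
-- and inputs whose (possibly z-truncated) alphabet window is fully covered, where A falls off the loop
-- and returns None.
def Pre_find_missing_letter (chars : List String) : Prop :=
  chars ≠ [] ∧
  PySem.Str.isIn (PySem.Str.lower (chars.headD "")) "abcdefghijklmnopqrstuvwxyz" = true ∧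
  ∃ k : Nat, k < 26 ∧
    PySem.Str.find "abcdefghijklmnopqrstuvwxyz" (PySem.Str.lower (chars.headD "")) ≤ (k : Int) ∧
    (k : Int) < PySem.Str.find "abcdefghijklmnopqrstuvwxyz" (PySem.Str.lower (chars.headD "")) + chars.length + 1 ∧
    String.ofList [Char.ofNat (97 + k)] ∉ chars.map PySem.Str.lower
instance (chars : List String) : Decidable (Pre_find_missing_letter chars) := by
  unfold Pre_find_missing_letter; infer_instance

def pvWitness_find_missing_letter : List String := ["a", "b", "d"]

def Spec_find_missing_letter (chars : List String) (out : String) : Prop := out = find_missing_letter_alt chars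
instance (chars : List String) (out : String) : Decidable (Spec_find_missing_letter chars out) := by unfold Spec_find_missing_letter; infer_instance

-- ===== CLAIM (what is proved, stated in full; the proofs are below) =====
def Claim_equal_find_missing_letter : Prop := ∀ (chars : List String), Dom_find_missing_letter chars → Pre_find_missing_letter chars → Spec_find_missing_letter chars (find_missing_letter chars)

-- ===== LEMMAS AND PROOFS =====
theorem pvWitness_ok : Dom_find_missing_letter pvWitness_find_missing_letter ∧ Pre_find_missing_letter pvWitness_find_missing_letter := by
  refine ⟨by decide, by decide, by decide, 2, by decide, by decide, by decide, by decide⟩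

-- small Char toolkit
theorem toNat_ofNat_small (n : Nat) (h : n < 55296) : (Char.ofNat n).toNat = n := by
  simp [Char.ofNat, Nat.isValidChar, h, Char.toNat, Char.ofNatAux]

theorem char_le_iff (c d : Char) : c ≤ d ↔ c.toNat ≤ d.toNat := by
  rw [Char.le_def, Char.toNat, Char.toNat, ← UInt32.le_iff_toNat_le]

theorem char_eq_of_toNat {c d : Char} (h : c.toNat = d.toNat) : c = d := by
  apply Char.ext
  rw [Char.toNat, Char.toNat] at h
  exact UInt32.toNat_inj.mp h

def chrS (j : Int) : String := String.ofList [Char.ofNat (97 + j.toNat)]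

def abcList : List Char := "abcdefghijklmnopqrstuvwxyz".toList

theorem abcList_getD : ∀ i : Nat, i < 26 → abcList.getD i ' ' = Char.ofNat (97 + i) := by decide

theorem abcList_length : abcList.length = 26 := by decide

-- the slice of the alphabet as a mapped range of codes
theorem slice_abc (a k : Nat) (ha : a ≤ 26) :
    (abcList.drop a).take k = (List.range (min k (26 - a))).map (fun t => Char.ofNat (97 + (a + t))) := by
  apply List.ext_getElem
  · simp only [List.length_take, List.length_drop, List.length_map, List.length_range, abcList_length]
  · intro i h1 h2
    have hi : a + i < 26 := by
      simp only [List.length_take, List.length_drop, abcList_length] at h1; omega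
    have hg := abcList_getD (a + i) hi
    simp only [List.getElem_take, List.getElem_drop, List.getElem_map, List.getElem_range]
    rw [← List.getD_eq_getElem _ ' ', hg]

-- A's loop over mapped codes is a find? over the codes followed by recasing
theorem findA_loop_map (check : List String) (up : Bool) (L : List Int) :
    findA_loop check up (L.map (fun j => Char.ofNat (97 + j.toNat))) =
      match L.find? (fun j => !check.contains (chrS j)) with
      | none => ""
      | some j => if up then PySem.Str.upper (chrS j) else chrS j := by
  induction L with
  | nil => rfl
  | cons x t ih =>
    by_cases hx : check.contains (chrS x) = true
    · simp only [List.map_cons, findA_loop]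
      rw [List.find?_cons_of_neg (by rw [hx]; decide),
        if_pos (by exact hx)]
      exact ih
    · have hfalse : check.contains (chrS x) = false := by
        cases hc : check.contains (chrS x) with
        | true => exact absurd hc hx
        | false => rfl
      simp only [List.map_cons, findA_loop]
      rw [List.find?_cons_of_pos (by rw [hfalse]; decide),
        if_neg (by exact fun hmem => hx (by exact hmem))]
      rfl

-- min? of a strictly sorted list is its head
theorem min?_sorted {L : List Int} (h : L.Pairwise (· < ·)) :
    PySem.List.min? L (fun x => x) = L.head? := by
  cases L with
  | nil => rfl
  | cons x t =>
    rcases hm : PySem.List.min? (x :: t) (fun x => x) with _ | m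
    · simp [PySem.List.min?_eq_none_iff] at hm
    · have hmem := PySem.List.min?_mem hm
      have hmin := PySem.List.min?_isMin hm
      rcases List.mem_cons.mp hmem with rfl | hmt
      · rfl
      · have hxm : x < m := (List.pairwise_cons.mp h).1 m hmt
        have hmx : (fun x => x) m ≤ (fun x => x) x := hmin x (List.mem_cons_self)
        simp only at hmx
        omega

-- first match: find? is the head of the filtered list
theorem find?_eq_head?_filter {α : Type} (p : α → Bool) (L : List α) :
    L.find? p = (L.filter p).head? := by
  induction L with
  | nil => rfl
  | cons x t ih =>
    by_cases hx : p x = true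
    · rw [List.find?_cons_of_pos hx, List.filter_cons_of_pos hx, List.head?_cons]
    · rw [List.find?_cons_of_neg (by simp [hx]), List.filter_cons_of_neg (by simp [hx]), ih]

theorem find?_congr {α : Type} (p q : α → Bool) (L : List α)
    (h : ∀ x ∈ L, p x = q x) : L.find? p = L.find? q := by
  induction L with
  | nil => rfl
  | cons x t ih =>
    have hx := h x (List.mem_cons_self)
    by_cases hp : p x = true
    · rw [List.find?_cons_of_pos hp, List.find?_cons_of_pos (hx ▸ hp)]
    · rw [List.find?_cons_of_neg (by simp [hp]), List.find?_cons_of_neg (by simp [← hx, hp]),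
        ih (fun y hy => h y (List.mem_cons_of_mem _ hy))]

-- membership bridge: a window letter is in check iff its code is in B's present set
theorem mem_present_iff (check : List String) (j : Int) (h0 : 0 ≤ j) (h26 : j < 26) :
    (j ∈ ((check.filter isLowerLetter1).map (fun s => pyOrd1 s - 97)) ↔ chrS j ∈ check) := by
  have hval : 97 + j.toNat < 55296 := by omega
  have htn : (Char.ofNat (97 + j.toNat)).toNat = 97 + j.toNat := toNat_ofNat_small _ hval
  have hlist : (chrS j).toList = [Char.ofNat (97 + j.toNat)] := by simp [chrS]
  have hlet : isLowerLetter1 (chrS j) = true := by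
    unfold isLowerLetter1
    rw [hlist]
    rw [decide_eq_true_eq]
    constructor
    · rw [char_le_iff, htn]
      have : ('a').toNat = 97 := by decide
      omega
    · rw [char_le_iff]; rw [htn]
      have : ('z').toNat = 122 := by decide
      rw [this]; omega
  constructor
  · intro hj
    rcases List.mem_map.mp hj with ⟨s, hs, hjs⟩
    rcases List.mem_filter.mp hs with ⟨hsc, hsl⟩
    unfold isLowerLetter1 at hsl
    rcases hsval : s.toList with _ | ⟨c, rest⟩
    · rw [hsval] at hsl; simp at hsl
    · rcases rest with _ | _
      · have hcv : c.toNat = 97 + j.toNat := by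
          unfold pyOrd1 at hjs; rw [hsval] at hjs; simp at hjs; omega
        have hseq : s = chrS j := by
          have h1 : s.toList = [Char.ofNat (97 + j.toNat)] := by
            rw [hsval]
            exact congrArg (fun c => [c]) (char_eq_of_toNat (by rw [hcv, htn]))
          calc s = String.ofList s.toList := by simp
            _ = chrS j := by rw [h1]; rfl
        rw [← hseq]; exact hsc
      · rw [hsval] at hsl; simp at hsl
  · intro hmem
    apply List.mem_map.mpr
    refine ⟨chrS j, List.mem_filter.mpr ⟨hmem, hlet⟩, ?_⟩
    unfold pyOrd1
    rw [hlist]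
    simp only [List.headD_cons]
    rw [htn]
    omega


-- the alphabet slice, as characters of a code range
theorem slice_toList_eq (i0 n : Int) (h0 : 0 ≤ i0) (h26 : i0 ≤ 26) (hn : 0 ≤ n) :
    (PySem.Str.slice "abcdefghijklmnopqrstuvwxyz" (some i0) (some (i0 + n + 1))).toList
      = (PySem.List.pyRange i0 (min (i0 + n + 1) 26) 1).map (fun j => Char.ofNat (97 + j.toNat)) := by
  rw [PySem.Str.toList_slice, PySem.Chars.slice_eq_listSlice,
    PySem.List.slice_toNat _ h0 (by omega),
    show "abcdefghijklmnopqrstuvwxyz".toList = abcList from rfl,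
    slice_abc i0.toNat _ (by omega), PySem.List.pyRange_one, List.map_map,
    show min ((i0 + n + 1).toNat - i0.toNat) (26 - i0.toNat) = (min (i0 + n + 1) 26 - i0).toNat by omega]
  apply List.map_congr_left
  intro t _
  simp only [Function.comp]
  congr 1
  omega

set_option maxHeartbeats 1600000 in
theorem main_eq (chars : List String) (hpre : Pre_find_missing_letter chars) :
    find_missing_letter chars = find_missing_letter_alt chars := by
  obtain ⟨hne, hin, k, hk26, hkge, hklt, hknot⟩ := hpre
  rcases chars with _ | ⟨s0, rest⟩
  · exact absurd rfl hne
  simp only [List.headD_cons] at hin hkge hklt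
  have h0 : (0:Int) ≤ PySem.Str.find "abcdefghijklmnopqrstuvwxyz" (PySem.Str.lower s0) :=
    (PySem.Str.find_nonneg_iff _ _).mpr ((PySem.Str.isIn_iff_infix _ _).mp hin)
  have h26 : PySem.Str.find "abcdefghijklmnopqrstuvwxyz" (PySem.Str.lower s0) ≤ 26 := by
    have h := PySem.Chars.find_le_length "abcdefghijklmnopqrstuvwxyz".toList (PySem.Str.lower s0).toList
    have hlen : ("abcdefghijklmnopqrstuvwxyz".toList).length = 26 := by decide
    rw [hlen] at h
    simpa using h
  simp only [find_missing_letter, find_missing_letter_alt]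
  set i0 := PySem.Str.find "abcdefghijklmnopqrstuvwxyz" (PySem.Str.lower s0) with hi0
  rw [if_neg (show ¬ (i0 = -1) by omega), if_neg (show ¬ (i0 = -1) by omega)]
  set n : Int := (((s0 :: rest).length : Nat) : Int) with hn
  have hn0 : 0 ≤ n := by rw [hn]; exact Int.natCast_nonneg _
  set hi : Int := min (i0 + n + 1) 26 with hhi
  set check := (s0 :: rest).map PySem.Str.lower with hcheck
  set presentL := (check.filter isLowerLetter1).map (fun s => pyOrd1 s - 97) with hpres
  set R := PySem.List.pyRange i0 hi 1 with hR
  -- A side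
  rw [slice_toList_eq i0 n h0 h26 hn0, findA_loop_map,
    show PySem.List.pyRange i0 (min (i0 + n + 1) 26) 1 = R from rfl]
  -- B side
  rw [PySem.Set.ofList_eq_self_of_nodup R (PySem.List.nodup_pyRange_one i0 hi)]
  have hdiff : PySem.Set.diff R (PySem.Set.ofList presentL)
      = R.filter (fun x => !(PySem.Set.ofList presentL).contains x) := rfl
  have hpw : R.Pairwise (· < ·) := PySem.List.pairwise_lt_pyRange_one i0 hi
  have hsub : List.Sublist (R.filter (fun x => !(PySem.Set.ofList presentL).contains x)) R := List.filter_sublist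
  rw [hdiff, min?_sorted (hpw.sublist hsub),
    ← find?_eq_head?_filter]
  -- the two find?s agree
  have hfq : R.find? (fun j => !check.contains (chrS j))
      = R.find? (fun x => !(PySem.Set.ofList presentL).contains x) := by
    apply find?_congr
    intro j hj
    obtain ⟨hj1, hj2⟩ := PySem.List.mem_pyRange_one.mp hj
    have hj0 : 0 ≤ j := le_trans h0 hj1
    have hj26 : j < 26 := lt_of_lt_of_le hj2 (by rw [hhi]; exact min_le_right _ _)
    have hmem : (j ∈ presentL ↔ chrS j ∈ check) := mem_present_iff check j hj0 hj26
    have hset : (j ∈ PySem.Set.ofList presentL) ↔ (chrS j ∈ check) :=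
      (PySem.Set.mem_ofList _ _).trans hmem
    by_cases hmemb : chrS j ∈ check
    · have h1 : j ∈ PySem.Set.ofList presentL := hset.mpr hmemb
      simp [hmemb, h1]
    · have h1 : j ∉ PySem.Set.ofList presentL := fun hc => hmemb (hset.mp hc)
      simp [hmemb, h1]
  rw [hfq]
  rcases hf : R.find? (fun x => !(PySem.Set.ofList presentL).contains x) with _ | j
  · rfl
  · have hjR := List.mem_of_find?_eq_some hf
    obtain ⟨hj1, _⟩ := PySem.List.mem_pyRange_one.mp hjR
    have hj0 : 0 ≤ j := le_trans h0 hj1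
    have hchar : Char.ofNat ((j + 97).toNat) = Char.ofNat (97 + j.toNat) := by
      congr 1
      omega
    simp only [chrS, hchar]

-- ===== VERDICT (by name: the statement is the Claim_ definition above) =====
theorem find_missing_letter_spec : Claim_equal_find_missing_letter := by
  intro chars _ hpre
  unfold Spec_find_missing_letter
  exact main_eq chars hpre
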